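-- pv_equiv track=rewrite | github.com/brendanbikes/adventOfCode2021 | day19/day19Code.py | rotate
-- ===== SOURCE A (Python) =====
-- def rotateCWZ(beacons):
-- 	#rotates a set of beacon coordinates clockwise around the Z axis once
-- 	#z coordinates do not change
-- 	#new y coordinates are -x
-- 	#new x coordinates are y
-- 	return [(b[1],-b[0],b[2]) for b in beacons]
--
-- def rotateCWX(beacons):
-- 	#rotates a set of beacon coordinates clockwise around the X axis once
-- 	#x coordinates do not change
-- 	#new z coordinates are -y
-- 	#new y coordinates are z
-- 	return [(b[0],b[2],-b[1]) for b in beacons]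
--
-- def rotateCWY(beacons):
-- 	#rotates a set of beacon coordinates clockwise around the Y axis once
-- 	#y coordinates do not change
-- 	#new z coordinates are -x
-- 	#new x coordinates are z
-- 	return [(b[2],b[1],-b[0]) for b in beacons]
--
-- def rotate(beacons, rotation=(0,0,0)):
-- 	#rotates a list of beacon coordinates
-- 	#origin is the assumed origin location in (x,y,z) coordinate form
-- 	#rotateX, rotateY, rotateZ inputs are numbers of rotations with the named axis as the axis of rotation
-- 	#rotateZ ranges from 0 to 3
-- 	#rotateX ranges from 0 to 3
-- 	#rotateY is either 0, 1, or 3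
-- 	#This yields the number of rotational transformations of 24: 4 * 4 (X times Z) + 2 * 4 (Y times Z)
--
-- 	#do the rotation
-- 	for i in range(rotation[0]):
-- 		beacons = rotateCWX(beacons)
--
-- 	for i in range(rotation[1]):
-- 		beacons = rotateCWY(beacons)
--
-- 	for i in range(rotation[2]):
-- 		beacons = rotateCWZ(beacons)
--
-- 	return beacons
-- ===== SOURCE B (Python) =====
-- ROT_X = ((1, 0, 0), (0, 0, 1), (0, -1, 0))   # (x,y,z) -> (x, z, -y)
-- ROT_Y = ((0, 0, 1), (0, 1, 0), (-1, 0, 0))   # (x,y,z) -> (z, y, -x)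
-- ROT_Z = ((0, 1, 0), (-1, 0, 0), (0, 0, 1))   # (x,y,z) -> (y, -x, z)
--
-- def _mat_mul(m, n):
--     return tuple(tuple(sum(m[i][k] * n[k][j] for k in range(3)) for j in range(3)) for i in range(3))
--
-- def _mat_pow(m, count):
--     # a quarter-turn applied `count` times equals it applied count % 4 times;
--     # range() applies it zero times for count <= 0
--     e = count % 4 if count > 0 else 0
--     r = ((1, 0, 0), (0, 1, 0), (0, 0, 1))
--     for _ in range(e):
--         r = _mat_mul(m, r)
--     return r
--
-- def rotate(beacons, rotation=(0, 0, 0)):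
--     m = _mat_mul(_mat_pow(ROT_Z, rotation[2]),
--                  _mat_mul(_mat_pow(ROT_Y, rotation[1]), _mat_pow(ROT_X, rotation[0])))
--     return [(m[0][0]*x + m[0][1]*y + m[0][2]*z,
--              m[1][0]*x + m[1][1]*y + m[1][2]*z,
--              m[2][0]*x + m[2][1]*y + m[2][2]*z) for (x, y, z) in beacons]
-- ===== Notes on version B (the rewrite author's own statement) =====
-- stated objective: faster
-- what changed: Instead of rebuilding the beacon list once per unit rotation (up to rotation[i] list passes per axis), B composes a single 3x3 integer rotation matrix (reducing each count mod 4 for positive counts, 0 for non-positive, which is exact since each quarter-turn has period 4) and maps every beacon once through that matrix.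
import Mathlib
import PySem

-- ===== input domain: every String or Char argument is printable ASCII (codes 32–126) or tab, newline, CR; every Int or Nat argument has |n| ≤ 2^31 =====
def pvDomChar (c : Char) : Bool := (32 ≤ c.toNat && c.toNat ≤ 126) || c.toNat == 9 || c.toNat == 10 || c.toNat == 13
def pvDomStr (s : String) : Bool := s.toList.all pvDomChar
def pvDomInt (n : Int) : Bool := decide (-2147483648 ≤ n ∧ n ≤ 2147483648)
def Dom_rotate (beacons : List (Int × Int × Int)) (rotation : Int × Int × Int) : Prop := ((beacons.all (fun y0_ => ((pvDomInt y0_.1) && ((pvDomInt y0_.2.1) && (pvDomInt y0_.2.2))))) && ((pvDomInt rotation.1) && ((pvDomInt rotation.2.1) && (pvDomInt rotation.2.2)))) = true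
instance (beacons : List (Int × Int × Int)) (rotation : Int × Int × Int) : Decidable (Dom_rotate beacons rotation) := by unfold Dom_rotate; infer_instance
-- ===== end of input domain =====

-- B composes ONE 3x3 integer matrix (each quarter-turn count taken mod 4 when positive,
-- 0 otherwise — exact, since a quarter-turn has period 4) and maps each beacon once,
-- instead of A's up-to-rotation[i] whole-list passes per axis: asymptotically faster in the counts.

-- ===== PORT A =====
def rotateCWZ (beacons : List (Int × Int × Int)) : List (Int × Int × Int) :=
  beacons.map (fun b => (b.2.1, -b.1, b.2.2))

def rotateCWX (beacons : List (Int × Int × Int)) : List (Int × Int × Int) :=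
  beacons.map (fun b => (b.1, b.2.2, -b.2.1))

def rotateCWY (beacons : List (Int × Int × Int)) : List (Int × Int × Int) :=
  beacons.map (fun b => (b.2.2, b.2.1, -b.1))

def rotate (beacons : List (Int × Int × Int)) (rotation : Int × Int × Int) : List (Int × Int × Int) :=
  let b1 := (PySem.List.pyRange 0 rotation.1 1).foldl (fun bs _ => rotateCWX bs) beacons
  let b2 := (PySem.List.pyRange 0 rotation.2.1 1).foldl (fun bs _ => rotateCWY bs) b1
  (PySem.List.pyRange 0 rotation.2.2 1).foldl (fun bs _ => rotateCWZ bs) b2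

-- ===== PORT B =====
-- a 3x3 integer matrix as three rows of three entries
def Mat3 : Type := (Int × Int × Int) × (Int × Int × Int) × (Int × Int × Int)

def rotX : Mat3 := ((1, 0, 0), (0, 0, 1), (0, -1, 0))
def rotY : Mat3 := ((0, 0, 1), (0, 1, 0), (-1, 0, 0))
def rotZ : Mat3 := ((0, 1, 0), (-1, 0, 0), (0, 0, 1))

def matMul (m n : Mat3) : Mat3 :=
  ((m.1.1 * n.1.1 + m.1.2.1 * n.2.1.1 + m.1.2.2 * n.2.2.1,
    m.1.1 * n.1.2.1 + m.1.2.1 * n.2.1.2.1 + m.1.2.2 * n.2.2.2.1,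
    m.1.1 * n.1.2.2 + m.1.2.1 * n.2.1.2.2 + m.1.2.2 * n.2.2.2.2),
   (m.2.1.1 * n.1.1 + m.2.1.2.1 * n.2.1.1 + m.2.1.2.2 * n.2.2.1,
    m.2.1.1 * n.1.2.1 + m.2.1.2.1 * n.2.1.2.1 + m.2.1.2.2 * n.2.2.2.1,
    m.2.1.1 * n.1.2.2 + m.2.1.2.1 * n.2.1.2.2 + m.2.1.2.2 * n.2.2.2.2),
   (m.2.2.1 * n.1.1 + m.2.2.2.1 * n.2.1.1 + m.2.2.2.2 * n.2.2.1,
    m.2.2.1 * n.1.2.1 + m.2.2.2.1 * n.2.1.2.1 + m.2.2.2.2 * n.2.2.2.1,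
    m.2.2.1 * n.1.2.2 + m.2.2.2.1 * n.2.1.2.2 + m.2.2.2.2 * n.2.2.2.2))

def matPow (m : Mat3) (count : Int) : Mat3 :=
  let e : Int := if 0 < count then PySem.Int.mod count 4 else 0
  (PySem.List.pyRange 0 e 1).foldl (fun r _ => matMul m r) ((1, 0, 0), (0, 1, 0), (0, 0, 1))

def rotate_alt (beacons : List (Int × Int × Int)) (rotation : Int × Int × Int) : List (Int × Int × Int) :=
  let m := matMul (matPow rotZ rotation.2.2) (matMul (matPow rotY rotation.2.1) (matPow rotX rotation.1))
  beacons.map (fun p =>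
    (m.1.1 * p.1 + m.1.2.1 * p.2.1 + m.1.2.2 * p.2.2,
     m.2.1.1 * p.1 + m.2.1.2.1 * p.2.1 + m.2.1.2.2 * p.2.2,
     m.2.2.1 * p.1 + m.2.2.2.1 * p.2.1 + m.2.2.2.2 * p.2.2))

-- ===== PRECONDITION & SPEC =====
def Spec_rotate (beacons : List (Int × Int × Int)) (rotation : Int × Int × Int) (out : List (Int × Int × Int)) : Prop := out = rotate_alt beacons rotation
instance (beacons : List (Int × Int × Int)) (rotation : Int × Int × Int) (out : List (Int × Int × Int)) : Decidable (Spec_rotate beacons rotation out) := by unfold Spec_rotate; infer_instance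

-- ===== CLAIM (what is proved, stated in full; the proofs are below) =====
def Claim_equal_rotate : Prop := ∀ (beacons : List (Int × Int × Int)) (rotation : Int × Int × Int), Dom_rotate beacons rotation → Spec_rotate beacons rotation (rotate beacons rotation)

-- ===== LEMMAS AND PROOFS =====

-- apply a matrix to a point (proof-side abbreviation of the expression in rotate_alt)
def applyM (m : Mat3) (p : Int × Int × Int) : Int × Int × Int :=
  (m.1.1 * p.1 + m.1.2.1 * p.2.1 + m.1.2.2 * p.2.2,
   m.2.1.1 * p.1 + m.2.1.2.1 * p.2.1 + m.2.1.2.2 * p.2.2,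
   m.2.2.1 * p.1 + m.2.2.2.1 * p.2.1 + m.2.2.2.2 * p.2.2)

theorem applyM_matMul (m n : Mat3) (p : Int × Int × Int) :
    applyM (matMul m n) p = applyM m (applyM n p) := by
  simp only [applyM, matMul]; refine Prod.ext ?_ (Prod.ext ?_ ?_) <;> ring

-- a foldl that ignores the list elements is an iterate
theorem foldl_const_iterate {α β : Type} (g : α → α) (l : List β) (x : α) :
    l.foldl (fun a _ => g a) x = g^[l.length] x := by
  induction l generalizing x with
  | nil => rfl
  | cons _ t ih => simp [List.foldl_cons, ih, Function.iterate_succ_apply]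

theorem map_iterate {α : Type} (f : α → α) (n : Nat) (l : List α) :
    (List.map f)^[n] l = l.map f^[n] := by
  induction n generalizing l with
  | zero => simp
  | succ k ih => simp [Function.iterate_succ_apply, ih]

-- period-4 point maps: iterating n times equals iterating n % 4 times
theorem iterate_mod_four {α : Type} (f : α → α) (h4 : ∀ p, f (f (f (f p))) = p)
    (n : Nat) (p : α) : f^[n] p = f^[n % 4] p := by
  induction n using Nat.strong_induction_on with
  | _ n ih =>
    by_cases h : n < 4
    · rw [Nat.mod_eq_of_lt h]
    · have hn : n = (n - 4) + 4 := by omega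
      rw [hn, Function.iterate_add_apply]
      have : f^[4] p = p := h4 p
      rw [this, ih (n - 4) (by omega)]
      congr 1
      omega

theorem applyM_iterate_matMul (m : Mat3) (f : (Int × Int × Int) → (Int × Int × Int))
    (hm : ∀ p, applyM m p = f p) (n : Nat) (p : Int × Int × Int) :
    applyM ((fun r => matMul m r)^[n] ((1, 0, 0), (0, 1, 0), (0, 0, 1))) p = f^[n] p := by
  induction n generalizing p with
  | zero => simp [applyM]
  | succ k ih =>
    rw [Function.iterate_succ_apply', applyM_matMul, ih, hm,
      Function.iterate_succ_apply']

theorem applyM_matPow (m : Mat3) (f : (Int × Int × Int) → (Int × Int × Int))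
    (hm : ∀ p, applyM m p = f p) (h4 : ∀ p, f (f (f (f p))) = p)
    (k : Int) (p : Int × Int × Int) :
    applyM (matPow m k) p = f^[k.toNat] p := by
  unfold matPow
  rw [foldl_const_iterate, PySem.List.length_pyRange_one,
    applyM_iterate_matMul m f hm]
  rw [iterate_mod_four f h4 k.toNat p]
  congr 2
  by_cases hk : 0 < k
  · simp only [if_pos hk]
    rw [PySem.Int.mod_eq_emod_of_pos (by norm_num)]
    omega
  · simp only [if_neg hk]
    omega

-- the three quarter-turn point maps of A
def fX (p : Int × Int × Int) : Int × Int × Int := (p.1, p.2.2, -p.2.1)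
def fY (p : Int × Int × Int) : Int × Int × Int := (p.2.2, p.2.1, -p.1)
def fZ (p : Int × Int × Int) : Int × Int × Int := (p.2.1, -p.1, p.2.2)

theorem fX4 (p : Int × Int × Int) : fX (fX (fX (fX p))) = p := by simp [fX]
theorem fY4 (p : Int × Int × Int) : fY (fY (fY (fY p))) = p := by simp [fY]
theorem fZ4 (p : Int × Int × Int) : fZ (fZ (fZ (fZ p))) = p := by simp [fZ]

theorem applyM_rotX (p : Int × Int × Int) : applyM rotX p = fX p := by
  simp [applyM, rotX, fX]
theorem applyM_rotY (p : Int × Int × Int) : applyM rotY p = fY p := by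
  simp [applyM, rotY, fY]
theorem applyM_rotZ (p : Int × Int × Int) : applyM rotZ p = fZ p := by
  simp [applyM, rotZ, fZ]

-- ===== VERDICT (by name: the statement is the Claim_ definition above) =====
theorem rotate_spec : Claim_equal_rotate := by
  intro beacons rotation _
  show rotate beacons rotation = rotate_alt beacons rotation
  obtain ⟨a, b, c⟩ := rotation
  simp only [rotate, rotate_alt, rotateCWX, rotateCWY, rotateCWZ]
  rw [foldl_const_iterate, foldl_const_iterate, foldl_const_iterate]
  simp only [PySem.List.length_pyRange_one, Int.sub_zero]
  rw [map_iterate, map_iterate, map_iterate, List.map_map, List.map_map]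
  apply List.map_congr_left
  intro p _
  show fZ^[c.toNat] (fY^[b.toNat] (fX^[a.toNat] p)) =
    applyM (matMul (matPow rotZ c) (matMul (matPow rotY b) (matPow rotX a))) p
  rw [applyM_matMul, applyM_matMul,
      applyM_matPow rotX fX applyM_rotX fX4 a,
      applyM_matPow rotY fY applyM_rotY fY4 b,
      applyM_matPow rotZ fZ applyM_rotZ fZ4 c]
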